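-- pv_equiv track=rewrite | github.com/bj0/aoc | aoc/2017/d3.py | part1
-- ===== SOURCE A (Python) =====
-- def f(n):
--     if n == 1: return 1
--     return 4 * (n - 1) + f(n - 2)
--
-- def part1(input):
--     for i in range(1, 2000, 2):
--         if input <= f(i):
--             break
--     else:
--         raise Exception(f" {i} not high enough: {input} > {f(i)}")
--
--     brcorner = f(i)
--     width = i
--     N = 4 * (width - 1)
--     side = N // 4
--     shell = (i + 1) // 2
--
--     if brcorner == input:
--         return shell - 1, shell - 1
--
--     tlcorner = brcorner - N // 2
--     p = brcorner - side // 2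
--     if abs(p - input) < side // 2:
--         return abs(p - input), shell - 1
--     elif abs((p - side) - input) < side // 2:
--         return shell - 1, abs((p - side) - input)
--     elif abs((p - 2 * side) - input) < side // 2:
--         return abs((p - 2 * side) - input), shell - 1
--     elif abs((p - 3 * side) - input) < side // 2:
--         return shell - 1, abs((p - 3 * side) - input)
--
--     raise Exception(f"can't get here:{input},{shell},{width},{side},{brcorner}")
-- ===== SOURCE B (Python) =====
-- def part1(input):
--     # shell radius k = smallest k >= 0 with input <= (2k+1)**2, by binary search
--     hi = 1
--     while (2 * hi + 1) * (2 * hi + 1) < input: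
--         hi *= 2
--     lo = 0
--     while lo < hi:
--         mid = (lo + hi) // 2
--         t = 2 * mid + 1
--         if input <= t * t:
--             hi = mid
--         else:
--             lo = mid + 1
--     k = lo
--     w = 2 * k + 1                 # ring width (odd)
--     j = w * w - input             # steps backwards from the bottom-right corner
--     if j == 0:
--         return (k, k)
--     side = w - 1
--     q, r = divmod(j, side)        # side index (0=bottom,1=left,2=top,3=right) and offset
--     off = abs(r - k)
--     return (off, k) if q % 2 == 0 else (k, off)
-- ===== Notes on version B (the rewrite author's own statement) =====
-- stated objective: faster
-- what changed: B finds the spiral ring width directly by binary search for the smallest odd w with input <= w*w (using f(i)=i*i in closed form) and locates the position on the ring with one divmod, instead of A's linear scan over odd i evaluating a linear-recursive f(i) at each step and a four-branch midpoint comparison.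
-- crash fix: A raises its explicit Exception on input <= 0, on input > 1999**2, and on the three non-bottom-right corner numbers of each ring (the witness 3 is one), where its strict '< side//2' comparisons all fail; B returns the correct (|x|, |y|) coordinates for every input >= 1, e.g. (1, 1) at the witness. — e.g. on part1(3): A raises Exception, B returns (1, 1)
import Mathlib
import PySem

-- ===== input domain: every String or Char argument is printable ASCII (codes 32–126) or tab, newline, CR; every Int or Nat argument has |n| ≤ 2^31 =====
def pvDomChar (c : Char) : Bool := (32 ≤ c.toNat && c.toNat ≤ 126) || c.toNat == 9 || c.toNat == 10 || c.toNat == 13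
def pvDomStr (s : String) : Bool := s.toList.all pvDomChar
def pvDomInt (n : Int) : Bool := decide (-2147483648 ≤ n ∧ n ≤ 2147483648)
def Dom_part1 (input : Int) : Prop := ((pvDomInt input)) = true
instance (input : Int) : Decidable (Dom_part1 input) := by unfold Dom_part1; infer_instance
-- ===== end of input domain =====

-- B replaces A's linear scan over odd ring widths (with a linear-recursive f) by a binary
-- search for the smallest odd w with input ≤ w² plus one divmod to locate the ring position
-- (objective: faster).
set_option maxRecDepth 40000


-- ===== PORT A =====
-- f(n) = 1 if n == 1 else 4*(n-1) + f(n-2).  Python's recursion terminates exactly on odd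
-- n ≥ 1, the only arguments part1 passes; the added 'n ≤ 0' guard (returning 0) marks the
-- inputs on which Python would recurse forever and makes the port total.
def fA (n : Int) : Int :=
  if n = 1 then 1
  else if h : n ≤ 0 then 0
  else 4 * (n - 1) + fA (n - 2)
termination_by n.toNat
decreasing_by omega

def part1 (input : Int) : Int × Int :=
  -- for i in range(1, 2000, 2): if input <= f(i): break / else: raise
  match (PySem.List.pyRange 1 2000 2).find? (fun i => decide (input ≤ fA i)) with
  | none => (0, 0)          -- Python raises Exception here (loop else); excluded by Pre_part1
  | some i =>
    let brcorner := fA i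
    let width := i
    let N := 4 * (width - 1)
    let side := PySem.Int.floordiv N 4
    let shell := PySem.Int.floordiv (i + 1) 2
    if brcorner = input then (shell - 1, shell - 1)
    else
      let _tlcorner := brcorner - PySem.Int.floordiv N 2   -- computed and unused, as in A
      let p := brcorner - PySem.Int.floordiv side 2
      if |p - input| < PySem.Int.floordiv side 2 then (|p - input|, shell - 1)
      else if |(p - side) - input| < PySem.Int.floordiv side 2 then (shell - 1, |(p - side) - input|)
      else if |(p - 2 * side) - input| < PySem.Int.floordiv side 2 then (|(p - 2 * side) - input|, shell - 1)
      else if |(p - 3 * side) - input| < PySem.Int.floordiv side 2 then (shell - 1, |(p - 3 * side) - input|)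
      else (0, 0)           -- Python raises Exception("can't get here"); excluded by Pre_part1

-- ===== PORT B =====
-- while (2*hi+1)*(2*hi+1) < input: hi *= 2      (fuel = initial gap; hi doubles each step,
-- so fuel input.toNat + 1 never runs out — the 'fuel 0' branch is unreachable from part1_alt)
def growHi (fuel : Nat) (input hi : Int) : Int :=
  match fuel with
  | 0 => hi
  | fuel + 1 => if (2 * hi + 1) * (2 * hi + 1) < input then growHi fuel input (hi * 2) else hi

-- while lo < hi: mid = (lo+hi)//2; t = 2*mid+1; if input <= t*t: hi = mid else: lo = mid+1
-- (fuel = hi - lo, which strictly bounds the number of iterations)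
def bsGo (fuel : Nat) (input lo hi : Int) : Int :=
  match fuel with
  | 0 => lo
  | fuel + 1 =>
    if lo < hi then
      let mid := PySem.Int.floordiv (lo + hi) 2
      let t := 2 * mid + 1
      if input ≤ t * t then bsGo fuel input lo mid else bsGo fuel input (mid + 1) hi
    else lo

def part1_alt (input : Int) : Int × Int :=
  let hi := growHi (input.toNat + 1) input 1
  let k := bsGo (hi - 0).toNat input 0 hi
  let w := 2 * k + 1
  let j := w * w - input
  if j = 0 then (k, k)
  else
    let side := w - 1
    let q := PySem.Int.floordiv j side    -- q, r = divmod(j, side); Python raises on side == 0,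
    let r := PySem.Int.mod j side         -- reached only for input ≤ 0, outside Pre_part1
    let off := |r - k|
    if PySem.Int.mod q 2 = 0 then (off, k) else (k, off)

-- ===== PRECONDITION & SPEC =====
-- Pre_part1 holds exactly where Python's part1 returns: A raises its explicit Exception on
-- input ≤ 0 and input > 1999² (loop exhausted), and on the three non-bottom-right corner
-- numbers w² - c*(w-1), c ∈ {1,2,3}, of each odd ring w ≥ 3 (all strict '< side//2'
-- comparisons fail there).
-- 12-step binary-search integer square root, exact for n < 4096² (proved below);
-- it lets a reader check the corner test without any long-running computation
def pvISqrtGo : Nat → Nat → Nat → Nat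
  | 0, _, m => m
  | f + 1, n, m => pvISqrtGo f n (if (m + 2 ^ f) * (m + 2 ^ f) ≤ n then m + 2 ^ f else m)
def pvISqrt (n : Nat) : Nat := pvISqrtGo 12 n 0
-- the ring width w that would make input the c-th corner, solved from input = w² - c*(w-1)
def pvCornerW (input : Int) (c : Int) : Int :=
  (c + (pvISqrt (4 * input + c * c - 4 * c).toNat : Int)) / 2

def Pre_part1 (input : Int) : Prop :=
  1 ≤ input ∧ input ≤ 3996001 ∧
    ∀ c : Nat, 1 ≤ c → c < 4 →
      ¬ (3 ≤ pvCornerW input c ∧ pvCornerW input c % 2 = 1 ∧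
         input = pvCornerW input c * pvCornerW input c - (c : Int) * (pvCornerW input c - 1))
instance (input : Int) : Decidable (Pre_part1 input) := by unfold Pre_part1; infer_instance

def pvWitness_part1 : Int := 10

-- A raises (Exception) on every input ≥ 1 outside Pre_part1 — the non-bottom-right ring
-- corners and everything beyond the last ring the loop reaches — while B returns the
-- correct (|x|, |y|) coordinates there.
def Raises_part1 (input : Int) : Prop := 1 ≤ input ∧ ¬ Pre_part1 input
instance (input : Int) : Decidable (Raises_part1 input) := by unfold Raises_part1; infer_instance
def pvRaiseWitness_part1 : Int := 3
def pvRaiseWitnessOut_part1 : Int × Int := (1, 1)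

def Spec_part1 (input : Int) (out : Int × Int) : Prop := out = part1_alt input
instance (input : Int) (out : Int × Int) : Decidable (Spec_part1 input out) := by unfold Spec_part1; infer_instance

-- ===== CLAIM (what is proved, stated in full; the proofs are below) =====
def Claim_equal_part1 : Prop := ∀ (input : Int), Dom_part1 input → Pre_part1 input → Spec_part1 input (part1 input)
def Claim_raises_part1 : Prop := (∀ (input : Int), Dom_part1 input → Raises_part1 input → ¬ Pre_part1 input) ∧ (Dom_part1 (pvRaiseWitness_part1) ∧ Raises_part1 (pvRaiseWitness_part1) ∧ part1_alt (pvRaiseWitness_part1) = pvRaiseWitnessOut_part1)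

-- ===== LEMMAS AND PROOFS =====

-- f computes the square on odd arguments
theorem fA_odd_sq (m : Nat) : fA (2 * (m : Int) + 1) = (2 * (m : Int) + 1) * (2 * (m : Int) + 1) := by
  induction m with
  | zero => rw [fA.eq_def]; norm_num
  | succ m ih =>
    rw [fA.eq_def]
    have h1 : ¬ (2 * ((m : Int) + 1) + 1 = 1) := by omega
    have h2 : ¬ (2 * ((m : Int) + 1) + 1 ≤ 0) := by omega
    push_cast
    rw [if_neg h1, dif_neg h2]
    have harg : 2 * ((m : Int) + 1) + 1 - 2 = 2 * (m : Int) + 1 := by ring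
    rw [harg, ih]
    ring

-- find? over List.range returns the first index satisfying p
theorem find?_range_eq_some (p : Nat → Bool) (n k : Nat) (hk : k < n) (hp : p k = true)
    (hmin : ∀ j, j < k → p j = false) : (List.range n).find? p = some k := by
  induction n with
  | zero => omega
  | succ n ih =>
    rw [List.range_succ, List.find?_append]
    rcases Nat.lt_or_ge k n with h | h
    · rw [ih h]; rfl
    · have hkn : k = n := by omega
      subst hkn
      have hnone : (List.range k).find? p = none := by
        rw [List.find?_eq_none]
        intro x hx
        simp [hmin x (List.mem_range.mp hx)]
      rw [hnone]
      simp [hp]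

-- binary-search invariant
theorem bsGo_spec (input : Int) : ∀ (fuel : Nat) (lo hi : Int), lo ≤ hi → (hi - lo).toNat ≤ fuel →
    input ≤ (2 * hi + 1) * (2 * hi + 1) →
    (∀ j, 0 ≤ j → j < lo → (2 * j + 1) * (2 * j + 1) < input) →
    lo ≤ bsGo fuel input lo hi ∧ bsGo fuel input lo hi ≤ hi ∧
    input ≤ (2 * bsGo fuel input lo hi + 1) * (2 * bsGo fuel input lo hi + 1) ∧
    (∀ j, 0 ≤ j → j < bsGo fuel input lo hi → (2 * j + 1) * (2 * j + 1) < input) := by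
  intro fuel
  induction fuel with
  | zero =>
    intro lo hi hle hfuel hub hmin
    have : lo = hi := by omega
    subst this
    simpa [bsGo] using ⟨hub, hmin⟩
  | succ fuel ih =>
    intro lo hi hle hfuel hub hmin
    rw [bsGo]
    by_cases hlt : lo < hi
    · rw [if_pos hlt]
      have hmid1 : lo ≤ PySem.Int.floordiv (lo + hi) 2 :=
        (PySem.Int.le_floordiv_iff_mul_le (by omega)).2 (by omega)
      have hmid2 : PySem.Int.floordiv (lo + hi) 2 < hi :=
        (PySem.Int.floordiv_lt_iff_lt_mul (by omega)).2 (by omega)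
      set mid := PySem.Int.floordiv (lo + hi) 2 with hmid
      by_cases hc : input ≤ (2 * mid + 1) * (2 * mid + 1)
      · rw [if_pos hc]
        exact ⟨(ih lo mid hmid1 (by omega) hc hmin).1,
          le_trans (ih lo mid hmid1 (by omega) hc hmin).2.1 (le_of_lt hmid2),
          (ih lo mid hmid1 (by omega) hc hmin).2.2⟩
      · rw [if_neg hc]
        have hmin' : ∀ j, 0 ≤ j → j < mid + 1 → (2 * j + 1) * (2 * j + 1) < input := by
          intro j hj0 hj
          rcases lt_or_ge j lo with h | h
          · exact hmin j hj0 h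
          · have hjm : j ≤ mid := by omega
            have hmono : (2 * j + 1) * (2 * j + 1) ≤ (2 * mid + 1) * (2 * mid + 1) := by
              nlinarith
            omega
        exact ⟨le_trans (le_trans hmid1 (by omega)) (ih (mid + 1) hi (by omega) (by omega) hub hmin').1,
          (ih (mid + 1) hi (by omega) (by omega) hub hmin').2.1,
          (ih (mid + 1) hi (by omega) (by omega) hub hmin').2.2⟩
    · rw [if_neg hlt]
      have heq : lo = hi := by omega
      subst heq
      exact ⟨le_refl _, le_refl _, hub, hmin⟩

-- doubling phase reaches an upper bound
theorem growHi_spec (input : Int) : ∀ (fuel : Nat) (hi : Int), 1 ≤ hi → (input - hi).toNat ≤ fuel →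
    1 ≤ growHi fuel input hi ∧
    input ≤ (2 * growHi fuel input hi + 1) * (2 * growHi fuel input hi + 1) := by
  intro fuel
  induction fuel with
  | zero =>
    intro hi h1 hfuel
    have : input ≤ hi := by omega
    have : hi ≤ (2 * hi + 1) * (2 * hi + 1) := by nlinarith
    simpa [growHi] using ⟨h1, by omega⟩
  | succ fuel ih =>
    intro hi h1 hfuel
    rw [growHi]
    by_cases hc : (2 * hi + 1) * (2 * hi + 1) < input
    · rw [if_pos hc]
      have hbig : 2 * hi < (2 * hi + 1) * (2 * hi + 1) := by nlinarith
      exact ih (hi * 2) (by omega) (by omega)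
    · rw [if_neg hc]
      exact ⟨h1, by omega⟩

theorem pvISqrtGo_spec : ∀ (f : Nat) (n m : Nat), m * m ≤ n → n < (m + 2 ^ f) * (m + 2 ^ f) →
    pvISqrtGo f n m * pvISqrtGo f n m ≤ n ∧ n < (pvISqrtGo f n m + 1) * (pvISqrtGo f n m + 1) := by
  intro f
  induction f with
  | zero =>
    intro n m h1 h2
    simp only [pvISqrtGo]
    norm_num at h2
    exact ⟨h1, h2⟩
  | succ f ih =>
    intro n m h1 h2
    rw [pvISqrtGo]
    by_cases hcond : (m + 2 ^ f) * (m + 2 ^ f) ≤ n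
    · rw [if_pos hcond]
      refine ih n (m + 2 ^ f) hcond ?_
      have hpow : m + 2 ^ f + 2 ^ f = m + 2 ^ (f + 1) := by
        rw [pow_succ]
        ring
      rw [hpow]
      exact h2
    · rw [if_neg hcond]
      exact ih n m h1 (by omega)

theorem pvISqrt_sq (t : Nat) (ht : t < 4096) : pvISqrt (t * t) = t := by
  obtain ⟨hs1, hs2⟩ := pvISqrtGo_spec 12 (t * t) 0 (by simp) (by norm_num; nlinarith)
  unfold pvISqrt
  have hle : pvISqrtGo 12 (t * t) 0 ≤ t := by nlinarith
  have hge : t ≤ pvISqrtGo 12 (t * t) 0 := by nlinarith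
  omega

-- ===== VERDICT (by name: the statement is the Claim_ definition above) =====
theorem part1_spec : Claim_equal_part1 := by
  intro input hdom hpre
  obtain ⟨h1, h2, hc⟩ := hpre
  unfold Spec_part1
  obtain ⟨hH1, hHub⟩ := growHi_spec input (input.toNat + 1) 1 (le_refl 1) (by omega)
  set H := growHi (input.toNat + 1) input 1 with hH
  obtain ⟨hk0, hkH, hkub, hkmin⟩ :=
    bsGo_spec input (H - 0).toNat 0 H (by omega) (le_refl _) hHub (by intro j hj hj'; omega)
  set k := bsGo (H - 0).toNat input 0 H with hkdef
  clear_value H k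
  have hk999 : k ≤ 999 := by
    by_contra hgt
    have h3 := hkmin 999 (by norm_num) (by omega)
    norm_num at h3
    omega
  have hfApred : ∀ t : Nat, fA (1 + 2 * (t : Int)) = (2 * (t : Int) + 1) * (2 * (t : Int) + 1) := by
    intro t
    rw [show (1 + 2 * (t : Int)) = 2 * (t : Int) + 1 by ring]
    exact fA_odd_sq t
  have hcast : ((k.toNat : Int)) = k := Int.toNat_of_nonneg hk0
  have hfind : (PySem.List.pyRange 1 2000 2).find? (fun i => decide (input ≤ fA i))
      = some (2 * k + 1) := by
    rw [PySem.List.pyRange_of_pos 1 2000 (by norm_num)]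
    rw [show (if (1 : Int) < 2000 then (((2000 : Int) - 1 + 2 - 1) / 2).toNat else 0) = 1000 by decide]
    rw [List.find?_map]
    rw [find?_range_eq_some _ 1000 k.toNat ?hk ?hp ?hmin]
    · simp only [Option.map_some]
      congr 1
      omega
    case hk => omega
    case hp =>
      simp only [Function.comp]
      rw [hfApred k.toNat, hcast]
      simpa using hkub
    case hmin =>
      intro j hj
      simp only [Function.comp]
      rw [hfApred j]
      have h4 := hkmin (j : Int) (by positivity) (by omega)
      simp
      linarith
  unfold part1 part1_alt
  simp only [hfind]
  rw [← hH, ← hkdef]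
  have hfAk : fA (2 * k + 1) = (2 * k + 1) * (2 * k + 1) := by
    have h5 := fA_odd_sq k.toNat
    rw [hcast] at h5
    exact h5
  have e1 : PySem.Int.floordiv (4 * (2 * k + 1 - 1)) 4 = 2 * k := by
    rw [PySem.Int.floordiv_eq_iff_of_pos (by norm_num)]
    omega
  have e2 : PySem.Int.floordiv (2 * k + 1 + 1) 2 = k + 1 := by
    rw [PySem.Int.floordiv_eq_iff_of_pos (by norm_num)]
    omega
  have e3 : PySem.Int.floordiv (2 * k) 2 = k := by
    rw [PySem.Int.floordiv_eq_iff_of_pos (by norm_num)]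
    omega
  -- facts needed after the square is generalized away
  have hub' : input ≤ 4 * (k * k) + 4 * k + 1 := by nlinarith [hkub]
  have hlb' : 1 ≤ k → 4 * (k * k) - 4 * k + 1 < input := by
    intro hk1
    have h5 := hkmin (k - 1) (by omega) (by omega)
    nlinarith [h5]
  have hcorner : ∀ c : Int, 1 ≤ c → c < 4 → 1 ≤ k →
      input ≠ 4 * (k * k) + 4 * k + 1 - c * (2 * k) := by
    intro c hc1 hc4 hk1 heq
    have hdisc : 4 * input + c * c - 4 * c
        = (2 * (2 * k + 1) - c) * (2 * (2 * k + 1) - c) := by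
      rw [heq]
      ring
    have ht : (2 * (2 * k + 1) - c).toNat < 4096 := by omega
    have htc : (((2 * (2 * k + 1) - c).toNat : Nat) : Int) = 2 * (2 * k + 1) - c := by omega
    have hnat : (4 * input + c * c - 4 * c).toNat
        = (2 * (2 * k + 1) - c).toNat * (2 * (2 * k + 1) - c).toNat := by
      have h7 : ((2 * (2 * k + 1) - c) * (2 * (2 * k + 1) - c) : Int)
          = (((2 * (2 * k + 1) - c).toNat * (2 * (2 * k + 1) - c).toNat : Nat) : Int) := by
        push_cast
        rw [htc]
      rw [hdisc, h7, Int.toNat_natCast]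
    have hW : pvCornerW input c = 2 * k + 1 := by
      unfold pvCornerW
      rw [hnat, pvISqrt_sq _ ht, htc]
      omega
    have h6 := hc c.toNat (by omega) (by omega)
    rw [show ((c.toNat : Nat) : Int) = c from by omega] at h6
    apply h6
    refine ⟨by rw [hW]; omega, by rw [hW]; omega, ?_⟩
    rw [hW, heq]
    ring
  rw [hfAk, e1, e2, e3, show (2 * k + 1 - 1 : Int) = 2 * k from by ring,
    show ((2 * k + 1) * (2 * k + 1) : Int) = 4 * (k * k) + 4 * k + 1 from by ring]
  generalize hK : (k * k : Int) = K2
  rw [hK] at hub' hlb' hcorner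
  by_cases hz : 4 * K2 + 4 * k + 1 - input = 0
  · rw [if_pos (by omega : 4 * K2 + 4 * k + 1 = input), if_pos hz]
    simp only [Prod.mk.injEq]
    omega
  · have hk1 : 1 ≤ k := by
      by_contra hk1
      have hk0' : k = 0 := by omega
      rw [hk0'] at hK
      simp at hK
      omega
    rw [if_neg (by omega : ¬ 4 * K2 + 4 * k + 1 = input), if_neg hz]
    obtain ⟨q, hqdef⟩ : ∃ q, PySem.Int.floordiv (4 * K2 + 4 * k + 1 - input) (2 * k) = q := ⟨_, rfl⟩
    obtain ⟨r, hrdef⟩ : ∃ r, PySem.Int.mod (4 * K2 + 4 * k + 1 - input) (2 * k) = r := ⟨_, rfl⟩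
    rw [hqdef, hrdef]
    have hqr := PySem.Int.floordiv_mul_add_mod (4 * K2 + 4 * k + 1 - input) (2 * k)
    rw [hqdef, hrdef] at hqr
    have hr0 : 0 ≤ r := by
      rw [← hrdef]
      exact PySem.Int.mod_nonneg _ (by omega)
    have hr2 : r < 2 * k := by
      rw [← hrdef]
      exact PySem.Int.mod_lt _ (by omega)
    have hq0 : 0 ≤ q := by
      rw [← hqdef]
      exact (PySem.Int.le_floordiv_iff_mul_le (by omega)).2 (by omega)
    have hq4 : q < 4 := by
      rw [← hqdef]
      exact (PySem.Int.floordiv_lt_iff_lt_mul (by omega)).2 (by have := hlb' hk1; omega)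
    have hrne : r ≠ 0 := by
      intro h0
      have hq1 : 1 ≤ q := by
        by_contra hlt
        have hq00 : q = 0 := by omega
        rw [hq00] at hqr
        omega
      exact hcorner q hq1 hq4 hk1 (by omega)
    clear hqdef hrdef hK hub' hfAk e1 e2 e3 hkub hkmin
    interval_cases q
    · rw [if_pos (abs_lt.2 ⟨by omega, by omega⟩ :
        |4 * K2 + 4 * k + 1 - k - input| < k)]
      rw [if_pos (by decide : PySem.Int.mod 0 2 = 0)]
      rw [show (4 * K2 + 4 * k + 1 - k - input : Int) = r - k from by omega]
      simp only [Prod.mk.injEq]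
      exact ⟨trivial, by omega⟩
    · rw [if_neg (by rw [abs_lt]; push Not; omega :
        ¬ |4 * K2 + 4 * k + 1 - k - input| < k)]
      rw [if_pos (abs_lt.2 ⟨by omega, by omega⟩ :
        |4 * K2 + 4 * k + 1 - k - 2 * k - input| < k)]
      rw [if_neg (by decide : ¬ PySem.Int.mod 1 2 = 0)]
      rw [show (4 * K2 + 4 * k + 1 - k - 2 * k - input : Int) = r - k from by omega]
      simp only [Prod.mk.injEq]
      exact ⟨by omega, trivial⟩
    · rw [if_neg (by rw [abs_lt]; push Not; omega :
        ¬ |4 * K2 + 4 * k + 1 - k - input| < k)]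
      rw [if_neg (by rw [abs_lt]; push Not; omega :
        ¬ |4 * K2 + 4 * k + 1 - k - 2 * k - input| < k)]
      rw [if_pos (abs_lt.2 ⟨by omega, by omega⟩ :
        |4 * K2 + 4 * k + 1 - k - 2 * (2 * k) - input| < k)]
      rw [if_pos (by decide : PySem.Int.mod 2 2 = 0)]
      rw [show (4 * K2 + 4 * k + 1 - k - 2 * (2 * k) - input : Int) = r - k from by omega]
      simp only [Prod.mk.injEq]
      exact ⟨trivial, by omega⟩
    · rw [if_neg (by rw [abs_lt]; push Not; omega :
        ¬ |4 * K2 + 4 * k + 1 - k - input| < k)]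
      rw [if_neg (by rw [abs_lt]; push Not; omega :
        ¬ |4 * K2 + 4 * k + 1 - k - 2 * k - input| < k)]
      rw [if_neg (by rw [abs_lt]; push Not; omega :
        ¬ |4 * K2 + 4 * k + 1 - k - 2 * (2 * k) - input| < k)]
      rw [if_pos (abs_lt.2 ⟨by omega, by omega⟩ :
        |4 * K2 + 4 * k + 1 - k - 3 * (2 * k) - input| < k)]
      rw [if_neg (by decide : ¬ PySem.Int.mod 3 2 = 0)]
      rw [show (4 * K2 + 4 * k + 1 - k - 3 * (2 * k) - input : Int) = r - k from by omega]
      simp only [Prod.mk.injEq]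
      exact ⟨by omega, trivial⟩

@[simp] theorem part1_raises : Claim_raises_part1 := by
  unfold Claim_raises_part1
  exact ⟨fun _ _ h => h.2, by decide⟩
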